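-- pv_equiv track=rewrite | github.com/fa-ris/coding-camp | group1and2_7_11_2023.py | animal_counter
-- ===== SOURCE A (Python) =====
-- def animal_counter(animals):
--     aDict = {}
--     for a in animals:
--         tempAnimal = a[0].upper() + a[1:].lower()
--         if not tempAnimal in aDict:
--             aDict[tempAnimal] = 1
--         else:
--             aDict[tempAnimal] += 1
--     return aDict
-- ===== SOURCE B (Python) =====
-- def animal_counter(animals):
--     norm = [a[0].upper() + a[1:].lower() for a in animals]
--     return {name: norm.count(name) for name in dict.fromkeys(norm)}
-- ===== Notes on version B (the rewrite author's own statement) =====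
-- stated objective: alternative
-- what changed: Replaces the single-pass dict accumulation with a two-phase approach: normalize all names into a list, then build the result by counting each distinct name (ordered dedup via dict.fromkeys) with list.count.
import Mathlib
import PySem

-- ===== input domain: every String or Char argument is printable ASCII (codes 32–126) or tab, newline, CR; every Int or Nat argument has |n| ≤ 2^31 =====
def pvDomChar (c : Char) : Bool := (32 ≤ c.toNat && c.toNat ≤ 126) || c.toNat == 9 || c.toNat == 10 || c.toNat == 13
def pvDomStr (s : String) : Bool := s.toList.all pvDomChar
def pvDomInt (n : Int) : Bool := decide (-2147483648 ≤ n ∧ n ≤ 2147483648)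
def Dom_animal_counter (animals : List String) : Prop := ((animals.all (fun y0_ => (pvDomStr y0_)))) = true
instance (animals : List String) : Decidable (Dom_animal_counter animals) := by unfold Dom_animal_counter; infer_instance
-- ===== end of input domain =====

-- B replaces A's single-pass dict accumulation by normalize-all, ordered-dedup, then count each
-- distinct name with list.count (alternative decomposition, not faster).

-- shared normalization: a[0].upper() + a[1:].lower() (both Pythons use this exact expression).
-- Python raises IndexError on a = "" (pyGet? = none); those inputs are excluded by Pre_ and the
-- none branch here is never reached on admitted inputs.
def pyNormalize (a : String) : String :=
  match PySem.List.pyGet? a.toList 0 with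
  | some c => String.ofList (PySem.Chars.upper [c] ++ PySem.Chars.lower (PySem.List.slice a.toList (some 1) none))
  | none => ""

-- ===== PORT A =====
-- the body of A's for-loop
def aStep (aDict : PySem.Dict String Int) (a : String) : PySem.Dict String Int :=
  let tempAnimal := pyNormalize a
  if aDict.contains tempAnimal = false then
    aDict.insert tempAnimal 1
  else
    aDict.insert tempAnimal (aDict.getD tempAnimal 0 + 1)

def animal_counter (animals : List String) : List (String × Int) :=
  (animals.foldl aStep (PySem.Dict.empty : PySem.Dict String Int)).items

-- ===== PORT B =====
def animal_counter_alt (animals : List String) : List (String × Int) :=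
  let norm := animals.map pyNormalize
  ((PySem.List.dedup norm).foldl
    (fun d name => d.insert name ((norm.count name : Int)))
    (PySem.Dict.empty : PySem.Dict String Int)).items

-- ===== PRECONDITION & SPEC =====
-- Pre_ excludes exactly the inputs containing an empty string, on which A raises IndexError at a[0].
def Pre_animal_counter (animals : List String) : Prop := ∀ a ∈ animals, a ≠ ""
instance (animals : List String) : Decidable (Pre_animal_counter animals) := by
  unfold Pre_animal_counter; infer_instance

def pvWitness_animal_counter : List String := ["cat", "CAT", "dog"]

def Spec_animal_counter (animals : List String) (out : List (String × Int)) : Prop := out = animal_counter_alt animals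
instance (animals : List String) (out : List (String × Int)) : Decidable (Spec_animal_counter animals out) := by unfold Spec_animal_counter; infer_instance

-- ===== CLAIM (what is proved, stated in full; the proofs are below) =====
def Claim_equal_animal_counter : Prop := ∀ (animals : List String), Dom_animal_counter animals → Pre_animal_counter animals → Spec_animal_counter animals (animal_counter animals)

-- ===== LEMMAS AND PROOFS =====

-- A's loop body is, in either branch, an insert of (old count + 1)
lemma a_step_eq (d : PySem.Dict String Int) (t : String) :
    aStep d t = d.insert (pyNormalize t) (d.getD (pyNormalize t) 0 + 1) := by
  unfold aStep
  set u := pyNormalize t with hu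
  by_cases h : d.contains u = false
  · simp [h, PySem.Dict.getD_of_not_contains d 0 h]
  · simp [h]

-- A's fold over animals is the Counter of the normalized list
lemma a_fold_eq_counter (animals : List String) (d : PySem.Dict String Int) :
    (animals.foldl aStep d)
    = (animals.map pyNormalize).foldl (fun d x => d.insert x (d.getD x 0 + 1)) d := by
  induction animals generalizing d with
  | nil => rfl
  | cons a l ih => simp only [List.foldl_cons, List.map_cons]; rw [a_step_eq]; exact ih _

-- ===== VERDICT (by name: the statement is the Claim_ definition above) =====
theorem animal_counter_spec : Claim_equal_animal_counter := by
  intro animals _ _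
  unfold Spec_animal_counter animal_counter animal_counter_alt
  rw [a_fold_eq_counter, PySem.Dict.foldl_insert_getD_add_one_eq_counter, PySem.Dict.items_counter]
  rw [PySem.Dict.items_foldl_insert_fresh _ _ _ _
        (fun a _ => rfl) ((PySem.List.nodup_dedup _).map_on (fun a _ b _ h => h))]
  simp [PySem.List.dedup_eq_ofList, PySem.Dict.empty]
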